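-- pv_equiv track=rewrite | github.com/amisinha/Leetcode | 2279-maximum-bags-with-full-capacity-of-rocks/2279-maximum-bags-with-full-capacity-of-rocks.py | maximumBags
-- ===== SOURCE A (Python) =====
-- from typing import List
--
-- def maximumBags(capacity: List[int], rocks: List[int], additionalRocks: int) -> int:
--     newList = []
--     for i in range(len(capacity)):
--         newList.append(capacity[i]-rocks[i])
--     newList.sort()
--     remainingRocks = additionalRocks
--
--     tot = 0
--     for i in newList:
--         if i <= remainingRocks:
--             tot +=1
--             remainingRocks -= i
--     return tot
-- ===== SOURCE B (Python) =====
-- from typing import List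
--
-- def maximumBags(capacity: List[int], rocks: List[int], additionalRocks: int) -> int:
--     # Sort the deficits, tabulate their running prefix sums, and return the
--     # index of the first prefix sum exceeding the budget (= bags fillable).
--     deficits = sorted(c - r for c, r in zip(capacity, rocks))
--     prefixes = []
--     total = 0
--     for d in deficits:
--         total += d
--         prefixes.append(total)
--     return next((k for k, s in enumerate(prefixes) if s > additionalRocks),
--                 len(prefixes))
-- ===== Notes on version B (the rewrite author's own statement) =====
-- stated objective: alternative
-- what changed: B zips capacity/rocks into sorted deficits, builds the prefix-sum table, and returns the index of the first prefix sum exceeding the budget, instead of A's index loop that decrements a remaining-budget accumulator while counting.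
import Mathlib
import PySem

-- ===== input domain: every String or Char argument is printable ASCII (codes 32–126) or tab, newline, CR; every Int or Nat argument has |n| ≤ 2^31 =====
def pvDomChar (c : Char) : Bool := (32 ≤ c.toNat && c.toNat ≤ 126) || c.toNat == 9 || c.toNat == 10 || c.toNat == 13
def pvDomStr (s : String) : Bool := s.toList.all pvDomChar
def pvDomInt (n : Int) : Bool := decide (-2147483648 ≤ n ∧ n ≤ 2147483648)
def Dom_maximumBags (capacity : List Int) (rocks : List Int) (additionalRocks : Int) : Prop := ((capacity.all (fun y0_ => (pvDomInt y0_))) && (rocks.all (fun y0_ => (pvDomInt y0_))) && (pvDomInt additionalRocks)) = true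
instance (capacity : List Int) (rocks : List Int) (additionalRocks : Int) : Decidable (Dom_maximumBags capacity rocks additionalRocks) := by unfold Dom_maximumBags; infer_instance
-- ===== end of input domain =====

-- B replaces A's budget-decrementing count loop with a sorted-deficit prefix-sum table and
-- a first-index-exceeding scan (alternative decomposition, same asymptotic cost).


-- ===== PORT A =====
-- literal port of A: index loop building capacity[i]-rocks[i], sort, then the
-- budget-decrementing count loop.  pyGetD _ _ 0 is exact under Pre_ (indices in range).
def maximumBags (capacity : List Int) (rocks : List Int) (additionalRocks : Int) : Int :=
  let newList : List Int :=
    (PySem.List.pyRange 0 capacity.length 1).foldl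
      (fun acc i => acc ++ [PySem.List.pyGetD capacity i 0 - PySem.List.pyGetD rocks i 0]) []
  let sortedL := PySem.List.sorted newList id false
  let st := sortedL.foldl
      (fun (st : Int × Int) i => if i ≤ st.1 then (st.1 - i, st.2 + 1) else st)
      (additionalRocks, 0)
  st.2

-- ===== PORT B =====
-- port of Source B's 'next((k for k, s in enumerate(prefixes) if s > add), len(prefixes))':
-- first index whose element exceeds add, else the length (k counts from the start value).
def pvFirstExceed (ps : List Int) (add : Int) (k : Int) : Int :=
  match ps with
  | [] => k
  | s :: t => if s > add then k else pvFirstExceed t add (k + 1)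

def maximumBags_alt (capacity : List Int) (rocks : List Int) (additionalRocks : Int) : Int :=
  let deficits := PySem.List.sorted ((capacity.zip rocks).map (fun p => p.1 - p.2)) id false
  let prefixes :=
    (deficits.foldl (fun (st : List Int × Int) d => (st.1 ++ [st.2 + d], st.2 + d)) ([], 0)).1
  pvFirstExceed prefixes additionalRocks 0

-- ===== PRECONDITION & SPEC =====
-- A indexes rocks[i] for every i < len(capacity): it raises IndexError when rocks is shorter.
def Pre_maximumBags (capacity : List Int) (rocks : List Int) (additionalRocks : Int) : Prop :=
  capacity.length ≤ rocks.length
instance (capacity : List Int) (rocks : List Int) (additionalRocks : Int) : Decidable (Pre_maximumBags capacity rocks additionalRocks) := by unfold Pre_maximumBags; infer_instance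

def pvWitness_maximumBags : List Int × List Int × Int := ([4, 2, 5], [1, 2, 4], 2)

def Spec_maximumBags (capacity : List Int) (rocks : List Int) (additionalRocks : Int) (out : Int) : Prop := out = maximumBags_alt capacity rocks additionalRocks
instance (capacity : List Int) (rocks : List Int) (additionalRocks : Int) (out : Int) : Decidable (Spec_maximumBags capacity rocks additionalRocks out) := by unfold Spec_maximumBags; infer_instance

-- ===== CLAIM (what is proved, stated in full; the proofs are below) =====
def Claim_equal_maximumBags : Prop := ∀ (capacity : List Int) (rocks : List Int) (additionalRocks : Int), Dom_maximumBags capacity rocks additionalRocks → Pre_maximumBags capacity rocks additionalRocks → Spec_maximumBags capacity rocks additionalRocks (maximumBags capacity rocks additionalRocks)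

-- ===== LEMMAS AND PROOFS =====

-- common recursive specification: greedy count over a sorted deficit list
def pvSpecCount : List Int → Int → Int
  | [], _ => 0
  | d :: l, r => if d ≤ r then 1 + pvSpecCount l (r - d) else 0

-- prefix sums starting from offset t
def pvScan : Int → List Int → List Int
  | _, [] => []
  | t, d :: l => (t + d) :: pvScan (t + d) l

theorem pv_build_eq (capacity rocks : List Int) (h : capacity.length ≤ rocks.length) :
    (PySem.List.pyRange 0 capacity.length 1).foldl
      (fun acc i => acc ++ [PySem.List.pyGetD capacity i 0 - PySem.List.pyGetD rocks i 0]) []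
    = (capacity.zip rocks).map (fun p => p.1 - p.2) := by
  rw [PySem.List.foldl_append_singleton_eq_map, PySem.List.pyRange_one]
  simp only [sub_zero, List.map_map]
  apply List.ext_getElem
  · simp [Nat.min_eq_left h]
  · intro k h1 h2
    have hk : k < capacity.length := by simpa using h1
    have hk' : k < rocks.length := lt_of_lt_of_le hk h
    simp [PySem.List.pyGetD_natCast, List.getD, hk, hk']

theorem pv_skip (l : List Int) (r t : Int) (h : ∀ x ∈ l, ¬ x ≤ r) :
    l.foldl (fun (st : Int × Int) i => if i ≤ st.1 then (st.1 - i, st.2 + 1) else st) (r, t)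
      = (r, t) := by
  induction l with
  | nil => rfl
  | cons d l ih =>
    simp only [List.foldl_cons]
    rw [if_neg (h d (by simp))]
    exact ih (fun x hx => h x (by simp [hx]))

theorem pv_greedy_eq (l : List Int) (hs : l.Pairwise (· ≤ ·)) : ∀ r t : Int,
    (l.foldl (fun (st : Int × Int) i => if i ≤ st.1 then (st.1 - i, st.2 + 1) else st) (r, t)).2
      = t + pvSpecCount l r := by
  induction l with
  | nil => intro r t; simp [pvSpecCount]
  | cons d l ih =>
    intro r t
    rcases List.pairwise_cons.mp hs with ⟨hd, hl⟩
    simp only [List.foldl_cons, pvSpecCount]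
    by_cases hdr : d ≤ r
    · rw [if_pos hdr, if_pos hdr, ih hl]
      ring
    · rw [if_neg hdr, if_neg hdr]
      rw [pv_skip l r t (fun x hx hxr => hdr (le_trans (hd x hx) hxr))]
      ring

theorem pv_prefix_eq (l : List Int) : ∀ (acc : List Int) (t : Int),
    (l.foldl (fun (st : List Int × Int) d => (st.1 ++ [st.2 + d], st.2 + d)) (acc, t)).1
      = acc ++ pvScan t l := by
  induction l with
  | nil => intro acc t; simp [pvScan]
  | cons d l ih =>
    intro acc t
    simp only [List.foldl_cons, pvScan, ih]
    simp

theorem pv_firstExceed_scan (l : List Int) : ∀ (t r k : Int),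
    pvFirstExceed (pvScan t l) r k = k + pvSpecCount l (r - t) := by
  induction l with
  | nil => intro t r k; simp [pvScan, pvFirstExceed, pvSpecCount]
  | cons d l ih =>
    intro t r k
    simp only [pvScan, pvFirstExceed, pvSpecCount]
    by_cases hd : d ≤ r - t
    · rw [if_neg (by omega), if_pos hd, ih]
      ring_nf
    · rw [if_pos (by omega), if_neg hd]
      ring

-- ===== VERDICT (by name: the statement is the Claim_ definition above) =====
theorem maximumBags_spec : Claim_equal_maximumBags := by
  intro capacity rocks additionalRocks _ hpre
  unfold Spec_maximumBags maximumBags maximumBags_alt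
  rw [pv_build_eq capacity rocks hpre]
  set l := PySem.List.sorted ((capacity.zip rocks).map (fun p => p.1 - p.2)) id false with hl
  have hs : l.Pairwise (· ≤ ·) := by
    simpa using PySem.List.sorted_pairwise (xs := (capacity.zip rocks).map (fun p => p.1 - p.2))
      (key := id)
  rw [pv_greedy_eq l hs additionalRocks 0]
  simp only [pv_prefix_eq, pv_firstExceed_scan, List.nil_append]
  ring_nf
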